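-- pv_equiv track=rewrite | github.com/vHozang/AutoRecruit | app/main.py | detect_section_marker
-- ===== SOURCE A (Python) =====
-- from typing import Any, Dict, List, Optional, Set, Tuple
--
-- MUST_SECTION_MARKERS = [
--     "must have",
--     "required",
--     "requirement",
--     "mandatory",
--     "bat buoc",
--     "yeu cau",
--     "can co",
-- ]
--
-- NICE_SECTION_MARKERS = [
--     "nice to have",
--     "preferred",
--     "plus point",
--     "good to have",
--     "uu tien",
--     "loi the",
--     "bonus",
-- ]
--
-- def detect_section_marker(line: str) -> Optional[str]:
--     must_positions = [line.find(marker) for marker in MUST_SECTION_MARKERS if marker in line]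
--     nice_positions = [line.find(marker) for marker in NICE_SECTION_MARKERS if marker in line]
--
--     if not must_positions and not nice_positions:
--         return None
--
--     first_must = min(must_positions) if must_positions else None
--     first_nice = min(nice_positions) if nice_positions else None
--
--     if first_must is not None and (first_nice is None or first_must <= first_nice):
--         return "must"
--     if first_nice is not None:
--         return "nice"
--     return None
-- ===== SOURCE B (Python) =====
-- from typing import Optional
--
-- MUST_SECTION_MARKERS = [
--     "must have",
--     "required",
--     "requirement",
--     "mandatory",
--     "bat buoc",
--     "yeu cau",
--     "can co",
-- ]
--
-- NICE_SECTION_MARKERS = [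
--     "nice to have",
--     "preferred",
--     "plus point",
--     "good to have",
--     "uu tien",
--     "loi the",
--     "bonus",
-- ]
--
-- def detect_section_marker(line: str) -> Optional[str]:
--     # Single left-to-right scan: at the first index where any marker starts,
--     # answer "must" (checked first) or "nice"; no marker anywhere -> None.
--     for i in range(len(line)):
--         if any(line.startswith(m, i) for m in MUST_SECTION_MARKERS):
--             return "must"
--         if any(line.startswith(m, i) for m in NICE_SECTION_MARKERS):
--             return "nice"
--     return None
-- ===== Notes on version B (the rewrite author's own statement) =====
-- stated objective: alternative
-- what changed: Replaces A's two lists of find() positions and a comparison of their minima by a single left-to-right scan of the line that returns at the first index where any marker starts, checking must markers before nice ones.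
import Mathlib
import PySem

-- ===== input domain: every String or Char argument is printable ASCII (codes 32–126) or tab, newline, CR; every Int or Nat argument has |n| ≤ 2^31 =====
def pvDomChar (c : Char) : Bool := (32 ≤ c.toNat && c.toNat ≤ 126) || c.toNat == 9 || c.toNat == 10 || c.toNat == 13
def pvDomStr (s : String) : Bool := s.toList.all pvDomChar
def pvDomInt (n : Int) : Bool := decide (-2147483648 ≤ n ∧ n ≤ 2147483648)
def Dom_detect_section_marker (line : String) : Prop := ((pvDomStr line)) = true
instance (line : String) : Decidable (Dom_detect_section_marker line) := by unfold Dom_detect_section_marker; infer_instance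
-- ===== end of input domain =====

-- B replaces A's per-marker find()/min() bookkeeping by a single left-to-right scan of the
-- line that stops at the first index where any marker starts (must checked before nice).


-- module constants shared by both Pythons
def pvMustMarkers : List (List Char) :=
  ["must have".toList, "required".toList, "requirement".toList, "mandatory".toList,
   "bat buoc".toList, "yeu cau".toList, "can co".toList]
def pvNiceMarkers : List (List Char) :=
  ["nice to have".toList, "preferred".toList, "plus point".toList, "good to have".toList,
   "uu tien".toList, "loi the".toList, "bonus".toList]

-- ===== PORT A =====
-- [line.find(marker) for marker in MARKERS if marker in line]
def pvPositions (ms : List (List Char)) (cs : List Char) : List Int :=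
  (ms.filter (fun m => PySem.Chars.isIn m cs)).map (fun m => PySem.Chars.find cs m)

def detect_section_marker (line : String) : Option String :=
  let cs := line.toList
  let must_positions := pvPositions pvMustMarkers cs
  let nice_positions := pvPositions pvNiceMarkers cs
  if must_positions = [] ∧ nice_positions = [] then none
  else
    let first_must : Option Int := if must_positions = [] then none else PySem.List.min? must_positions id
    let first_nice : Option Int := if nice_positions = [] then none else PySem.List.min? nice_positions id
    match first_must, first_nice with
    | some fm, some fn => if fm ≤ fn then some "must" else some "nice"
    | some _, none => some "must"
    | none, some _ => some "nice"
    | none, none => none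

-- ===== PORT B =====
-- any(line.startswith(m, i) for m in MARKERS)
def pvStartsAt (ms : List (List Char)) (cs : List Char) (i : Nat) : Bool :=
  ms.any (fun m => PySem.Chars.startswith (cs.drop i) m)

def detect_section_marker_alt (line : String) : Option String :=
  let cs := line.toList
  (List.range cs.length).findSome? (fun i =>
    if pvStartsAt pvMustMarkers cs i then some "must"
    else if pvStartsAt pvNiceMarkers cs i then some "nice"
    else none)

-- ===== PRECONDITION & SPEC =====
def Spec_detect_section_marker (line : String) (out : Option String) : Prop := out = detect_section_marker_alt line
instance (line : String) (out : Option String) : Decidable (Spec_detect_section_marker line out) := by unfold Spec_detect_section_marker; infer_instance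

-- ===== CLAIM (what is proved, stated in full; the proofs are below) =====
def Claim_equal_detect_section_marker : Prop := ∀ (line : String), Dom_detect_section_marker line → Spec_detect_section_marker line (detect_section_marker line)

-- ===== LEMMAS AND PROOFS =====

-- "some marker of ms starts at index i of cs"
def pvAtIdx (ms : List (List Char)) (cs : List Char) (i : Nat) : Prop :=
  ∃ m ∈ ms, m <+: cs.drop i

theorem pvStartsAt_iff (ms : List (List Char)) (cs : List Char) (i : Nat) :
    pvStartsAt ms cs i = true ↔ pvAtIdx ms cs i := by
  simp [pvStartsAt, pvAtIdx, List.any_eq_true, PySem.Chars.startswith_iff]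

theorem pvPositions_eq_nil_iff (ms : List (List Char)) (cs : List Char) :
    pvPositions ms cs = [] ↔ ∀ i, ¬ pvAtIdx ms cs i := by
  constructor
  · intro h i ⟨m, hm, hpre⟩
    have hin : PySem.Chars.isIn m cs = true :=
      (PySem.Chars.exists_prefix_drop_iff_isIn m cs).1 ⟨i, hpre⟩
    have : m ∈ ms.filter (fun m => PySem.Chars.isIn m cs) := List.mem_filter.2 ⟨hm, hin⟩
    simp [pvPositions, List.map_eq_nil_iff, List.filter_eq_nil_iff] at h
    exact absurd hin (by simpa using h m hm)
  · intro h
    simp only [pvPositions, List.map_eq_nil_iff, List.filter_eq_nil_iff]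
    intro m hm hin
    obtain ⟨j, hpre⟩ := (PySem.Chars.exists_prefix_drop_iff_isIn m cs).2 hin
    exact h j ⟨m, hm, hpre⟩

-- the Python min over the positions list is the least index at which some marker starts
theorem pvMin_spec (ms : List (List Char)) (cs : List Char) (p : Int)
    (h : PySem.List.min? (pvPositions ms cs) id = some p) :
    0 ≤ p ∧ pvAtIdx ms cs p.toNat ∧ ∀ j < p.toNat, ¬ pvAtIdx ms cs j := by
  have hmem : p ∈ pvPositions ms cs := PySem.List.min?_mem h
  have hle : ∀ y ∈ pvPositions ms cs, p ≤ y := by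
    intro y hy; simpa using PySem.List.min?_isMin h y hy
  simp only [pvPositions, List.mem_map, List.mem_filter] at hmem
  obtain ⟨m, ⟨hm, hin⟩, hfind⟩ := hmem
  have hpos : 0 ≤ PySem.Chars.find cs m :=
    (PySem.Chars.find_nonneg_iff cs m).2 ((PySem.Chars.isIn_iff_infix m cs).1 hin)
  obtain ⟨hpre, hleast⟩ := PySem.Chars.find_spec hpos
  subst hfind
  refine ⟨hpos, ⟨m, hm, hpre⟩, ?_⟩
  intro j hj ⟨m', hm', hpre'⟩
  have hin' : PySem.Chars.isIn m' cs = true :=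
    (PySem.Chars.exists_prefix_drop_iff_isIn m' cs).1 ⟨j, hpre'⟩
  have hmem' : PySem.Chars.find cs m' ∈ pvPositions ms cs := by
    simp only [pvPositions, List.mem_map, List.mem_filter]
    exact ⟨m', ⟨hm', hin'⟩, rfl⟩
  have hle' : PySem.Chars.find cs m ≤ PySem.Chars.find cs m' := hle _ hmem'
  have hpos' : 0 ≤ PySem.Chars.find cs m' :=
    (PySem.Chars.find_nonneg_iff cs m').2 ((PySem.Chars.isIn_iff_infix m' cs).1 hin')
  obtain ⟨_, hleast'⟩ := PySem.Chars.find_spec hpos'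
  have : ¬ j < (PySem.Chars.find cs m').toNat := fun hlt => hleast' j hlt hpre'
  omega

theorem pvAtIdx_lt_length (ms : List (List Char)) (cs : List Char) (i : Nat)
    (hne : ∀ m ∈ ms, m ≠ []) (h : pvAtIdx ms cs i) : i < cs.length := by
  obtain ⟨m, hm, hpre⟩ := h
  by_contra hge
  have : cs.drop i = [] := List.drop_eq_nil_iff.2 (by omega)
  rw [this] at hpre
  exact hne m hm (List.prefix_nil.1 hpre)

theorem pvFindSome?_range_none {β : Type} (f : Nat → Option β) (n : Nat)
    (h : ∀ j < n, f j = none) : (List.range n).findSome? f = none :=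
  List.findSome?_eq_none_iff.2 (fun j hj => h j (List.mem_range.1 hj))

theorem pvFindSome?_range_eq {β : Type} (f : Nat → Option β) (n k : Nat)
    (hk : k < n) (hsome : f k ≠ none) (hb : ∀ j < k, f j = none) :
    (List.range n).findSome? f = f k := by
  induction n with
  | zero => omega
  | succ m ih =>
    rw [List.range_succ, List.findSome?_append]
    rcases Nat.lt_or_ge k m with hkm | hkm
    · rw [ih hkm]
      cases hfk : f k with
      | none => exact absurd hfk hsome
      | some b => rfl
    · have hkeq : k = m := by omega
      subst hkeq
      rw [pvFindSome?_range_none f k hb]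
      cases hfk : f k with
      | none => exact absurd hfk hsome
      | some b => simp [List.findSome?, hfk]

theorem pvMustMarkers_ne_nil : ∀ m ∈ pvMustMarkers, m ≠ [] := by decide
theorem pvNiceMarkers_ne_nil : ∀ m ∈ pvNiceMarkers, m ≠ [] := by decide

-- the body of B's scan (proof-side name; equal to B's lambda by rfl)
def pvBody (cs : List Char) (i : Nat) : Option String :=
  if pvStartsAt pvMustMarkers cs i then some "must"
  else if pvStartsAt pvNiceMarkers cs i then some "nice"
  else none

theorem pvBody_must (cs : List Char) (j : Nat) (h : pvAtIdx pvMustMarkers cs j) :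
    pvBody cs j = some "must" := by
  unfold pvBody
  rw [if_pos ((pvStartsAt_iff _ _ _).2 h)]

theorem pvBody_nice (cs : List Char) (j : Nat) (h1 : ¬ pvAtIdx pvMustMarkers cs j)
    (h2 : pvAtIdx pvNiceMarkers cs j) : pvBody cs j = some "nice" := by
  unfold pvBody
  rw [if_neg (fun hb => h1 ((pvStartsAt_iff _ _ _).1 hb)),
      if_pos ((pvStartsAt_iff _ _ _).2 h2)]

theorem pvBody_none (cs : List Char) (j : Nat) (h1 : ¬ pvAtIdx pvMustMarkers cs j)
    (h2 : ¬ pvAtIdx pvNiceMarkers cs j) : pvBody cs j = none := by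
  unfold pvBody
  rw [if_neg (fun hb => h1 ((pvStartsAt_iff _ _ _).1 hb)),
      if_neg (fun hb => h2 ((pvStartsAt_iff _ _ _).1 hb))]

theorem pv_alt_eq (line : String) :
    detect_section_marker_alt line =
      (List.range line.toList.length).findSome? (pvBody line.toList) := rfl

theorem pv_main (line : String) :
    detect_section_marker line = detect_section_marker_alt line := by
  rw [pv_alt_eq]
  unfold detect_section_marker
  set cs := line.toList with hcs
  by_cases hm : pvPositions pvMustMarkers cs = [] <;>
    by_cases hn : pvPositions pvNiceMarkers cs = []
  · -- both empty: A = none, B = none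
    have hnom := (pvPositions_eq_nil_iff _ _).1 hm
    have hnon := (pvPositions_eq_nil_iff _ _).1 hn
    rw [pvFindSome?_range_none (pvBody cs) cs.length
        (fun j _ => pvBody_none cs j (hnom j) (hnon j))]
    simp [hm, hn]
  · -- must empty, nice nonempty: "nice"
    have hnom := (pvPositions_eq_nil_iff _ _).1 hm
    obtain ⟨p, hp⟩ := Option.isSome_iff_exists.1
      (by rw [Option.isSome_iff_ne_none, Ne, PySem.List.min?_eq_none_iff]; exact hn :
        (PySem.List.min? (pvPositions pvNiceMarkers cs) id).isSome)
    obtain ⟨hp0, hat, hleast⟩ := pvMin_spec _ _ _ hp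
    rw [pvFindSome?_range_eq (pvBody cs) cs.length p.toNat
        (pvAtIdx_lt_length _ _ _ pvNiceMarkers_ne_nil hat)
        (by rw [pvBody_nice cs p.toNat (hnom _) hat]; simp)
        (fun j hj => pvBody_none cs j (hnom j) (hleast j hj)),
      pvBody_nice cs p.toNat (hnom _) hat]
    simp [hm, hn, hp]
  · -- must nonempty, nice empty: "must"
    have hnon := (pvPositions_eq_nil_iff _ _).1 hn
    obtain ⟨p, hp⟩ := Option.isSome_iff_exists.1
      (by rw [Option.isSome_iff_ne_none, Ne, PySem.List.min?_eq_none_iff]; exact hm :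
        (PySem.List.min? (pvPositions pvMustMarkers cs) id).isSome)
    obtain ⟨hp0, hat, hleast⟩ := pvMin_spec _ _ _ hp
    rw [pvFindSome?_range_eq (pvBody cs) cs.length p.toNat
        (pvAtIdx_lt_length _ _ _ pvMustMarkers_ne_nil hat)
        (by rw [pvBody_must cs p.toNat hat]; simp)
        (fun j hj => pvBody_none cs j (hleast j hj) (hnon j)),
      pvBody_must cs p.toNat hat]
    simp [hm, hn, hp]
  · -- both nonempty
    obtain ⟨pm, hpm⟩ := Option.isSome_iff_exists.1
      (by rw [Option.isSome_iff_ne_none, Ne, PySem.List.min?_eq_none_iff]; exact hm :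
        (PySem.List.min? (pvPositions pvMustMarkers cs) id).isSome)
    obtain ⟨pn, hpn⟩ := Option.isSome_iff_exists.1
      (by rw [Option.isSome_iff_ne_none, Ne, PySem.List.min?_eq_none_iff]; exact hn :
        (PySem.List.min? (pvPositions pvNiceMarkers cs) id).isSome)
    obtain ⟨hpm0, hatm, hleastm⟩ := pvMin_spec _ _ _ hpm
    obtain ⟨hpn0, hatn, hleastn⟩ := pvMin_spec _ _ _ hpn
    rcases le_or_gt pm pn with hle | hgt
    · -- A = "must"; B stops at pm.toNat
      rw [pvFindSome?_range_eq (pvBody cs) cs.length pm.toNat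
          (pvAtIdx_lt_length _ _ _ pvMustMarkers_ne_nil hatm)
          (by rw [pvBody_must cs pm.toNat hatm]; simp)
          (fun j hj => pvBody_none cs j (hleastm j hj) (hleastn j (by omega))),
        pvBody_must cs pm.toNat hatm]
      simp [hm, hn, hpm, hpn, hle]
    · -- A = "nice"; B stops at pn.toNat (< pm.toNat, so no must marker there)
      rw [pvFindSome?_range_eq (pvBody cs) cs.length pn.toNat
          (pvAtIdx_lt_length _ _ _ pvNiceMarkers_ne_nil hatn)
          (by rw [pvBody_nice cs pn.toNat (hleastm pn.toNat (by omega)) hatn]; simp)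
          (fun j hj => pvBody_none cs j (hleastm j (by omega)) (hleastn j hj)),
        pvBody_nice cs pn.toNat (hleastm pn.toNat (by omega)) hatn]
      have hnle : ¬ pm ≤ pn := by omega
      simp [hm, hn, hpm, hpn, hnle]

-- ===== VERDICT (by name: the statement is the Claim_ definition above) =====
theorem detect_section_marker_spec : Claim_equal_detect_section_marker := by
  intro line _
  unfold Spec_detect_section_marker
  exact pv_main line
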